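-- pv_equiv track=rewrite | github.com/cahaus19/DSMV | experiements/attempted_parsing.py | node_one
-- ===== SOURCE A (Python) =====
-- def node_one(line, index, last_letter=None):
--     if not line:
--         return False
--     if line[index].isupper():
--         return node_two(line, index + 1)
--     if line[index].isdigit():
--         return node_one(line, index + 1, line[index])
--     # if lat letter is none, then it won't become a digit (str(None).isdigit() is False)
--     if line[index] == '.' and str(last_letter).isdigit():
--         return node_two(line, index)
--     return True
--
-- def node_two(line, index):
--     if not line:
--         return False
--     if line[index] == '.':
--         return node_three(line, index + 1)
--     return False
--
-- def node_three(line, index):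
--     if not line:
--         return False
--     if line[index] == ' ':
--         return True
--     return False
-- ===== SOURCE B (Python) =====
-- def node_one(line, index, last_letter=None):
--     # Two-phase: (1) skip the digit run, recording only a boolean 'seen a digit'
--     # (any digit makes str(last).isdigit() true), (2) classify the stop character
--     # with inline one/two-char lookahead instead of extra state functions.
--     if not line:
--         return False
--     i, seen = index, str(last_letter).isdigit()
--     while line[i].isdigit():
--         i, seen = i + 1, True
--     c = line[i]
--     if c.isupper():
--         return line[i + 1] == '.' and line[i + 2] == ' '
--     if c == '.' and seen:
--         return line[i + 1] == ' '
--     return True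
-- ===== Notes on version B (the rewrite author's own statement) =====
-- stated objective: simpler
-- what changed: Replaced the three mutually recursive state functions by a two-phase routine: a digit-skipping scan that keeps only a boolean 'seen a digit' (instead of the last character string), followed by straight-line boolean lookahead tests ('.' then ' ') with no helper functions.
import Mathlib
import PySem

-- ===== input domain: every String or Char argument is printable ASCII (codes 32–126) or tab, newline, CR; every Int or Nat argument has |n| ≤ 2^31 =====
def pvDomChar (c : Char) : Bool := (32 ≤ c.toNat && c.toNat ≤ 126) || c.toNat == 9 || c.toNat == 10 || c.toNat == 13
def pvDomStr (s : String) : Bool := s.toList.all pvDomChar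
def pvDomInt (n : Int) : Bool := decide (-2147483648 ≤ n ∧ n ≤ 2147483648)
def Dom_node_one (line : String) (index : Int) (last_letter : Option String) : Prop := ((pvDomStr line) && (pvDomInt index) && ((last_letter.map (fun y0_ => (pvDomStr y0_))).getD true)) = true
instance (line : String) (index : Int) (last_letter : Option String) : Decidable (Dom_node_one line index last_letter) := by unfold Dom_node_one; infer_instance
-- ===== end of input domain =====

-- B replaces A's three mutually recursive state functions by a two-phase routine:
-- skip the digit run keeping only a boolean 'seen a digit', then classify the stop
-- character with inline lookahead (objective: simpler).

-- termination measure step, cited by both ports' recursions: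
-- a successful pyGet? means the index is below the length
lemma pvGetStep (cs : List Char) (i : Int) (c : Char)
    (h : PySem.List.pyGet? cs i = some c) :
    ((cs.length : Int) - (i + 1)).toNat < ((cs.length : Int) - i).toNat := by
  have hlt : i < (cs.length : Int) := by
    by_contra hge
    have hn : PySem.List.pyGet? cs i = none := by
      rw [PySem.List.pyGet?_eq_none_iff]
      simp only [PySem.Raise.InRange]
      omega
    simp [hn] at h
  omega

-- str(last_letter).isdigit(): str(None) = "None", which is not a digit string.
def optDigitStr (o : Option String) : Bool :=
  match o with
  | none => false
  | some s => PySem.Str.strIsdigit s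

-- ===== PORT A =====
-- helper node_three: 'none' from pyGet? is Python's IndexError (excluded by Pre_); the port returns false there.
def nodeThree (cs : List Char) (index : Int) : Bool :=
  if cs = [] then false
  else
    match PySem.List.pyGet? cs index with
    | none => false
    | some c => c == ' '

def nodeTwo (cs : List Char) (index : Int) : Bool :=
  if cs = [] then false
  else
    match PySem.List.pyGet? cs index with
    | none => false
    | some c => if c == '.' then nodeThree cs (index + 1) else false

def nodeOneRec (cs : List Char) (index : Int) (last : Option String) : Bool :=
  if _hcs : cs = [] then false
  else
    match h : PySem.List.pyGet? cs index with
    | none => false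
    | some c =>
      if PySem.Chars.isupper c then nodeTwo cs (index + 1)
      else if PySem.Chars.isdigit c then nodeOneRec cs (index + 1) (some (String.ofList [c]))
      else if c == '.' && optDigitStr last then nodeTwo cs index
      else true
termination_by ((cs.length : Int) - index).toNat
decreasing_by exact pvGetStep cs index c h

def node_one (line : String) (index : Int) (last_letter : Option String) : Bool :=
  nodeOneRec line.toList index last_letter

-- ===== PORT B =====
-- phase 1 of Source B: the while loop skipping digits; returns the stop index and the 'seen a digit' flag
def skipDigits (cs : List Char) (i : Int) (seen : Bool) : Int × Bool :=
  match h : PySem.List.pyGet? cs i with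
  | none => (i, seen)
  | some c => if PySem.Chars.isdigit c then skipDigits cs (i + 1) true else (i, seen)
termination_by ((cs.length : Int) - i).toNat
decreasing_by exact pvGetStep cs i c h

def node_one_alt (line : String) (index : Int) (last_letter : Option String) : Bool :=
  let cs := line.toList
  if cs.isEmpty then false
  else
    let p := skipDigits cs index (optDigitStr last_letter)
    -- phase 2 of Source B: classify the stop character with inline lookahead
    -- (pyGet? = none is Python's IndexError, excluded by Pre_)
    match PySem.List.pyGet? cs p.1 with
    | none => false
    | some c =>
      if PySem.Chars.isupper c then
        (PySem.List.pyGet? cs (p.1 + 1) == some '.') && (PySem.List.pyGet? cs (p.1 + 2) == some ' ')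
      else if c == '.' && p.2 then
        PySem.List.pyGet? cs (p.1 + 1) == some ' '
      else true

-- ===== PRECONDITION & SPEC =====
-- Pre_ helpers: after the digit run stops at character c, which further indices must be in range
def pvStepOK (cs : List Char) (i : Int) (c : Char) (lastDigit : Bool) : Bool :=
  if PySem.Chars.isupper c then
    (PySem.List.pyGet? cs (i + 1)).isSome &&
    (PySem.List.pyGet? cs (i + 1) != some '.' || (PySem.List.pyGet? cs (i + 2)).isSome)
  else if c == '.' && lastDigit then
    (PySem.List.pyGet? cs (i + 1)).isSome
  else true

def pvStopOK (cs : List Char) (index : Int) (j : Nat) (last : Option String) : Bool :=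
  (PySem.List.pyGet? cs (index + (j : Int))).any
    (fun c => !PySem.Chars.isdigit c && pvStepOK cs (index + (j : Int)) c (j != 0 || optDigitStr last))

-- Pre_ excludes exactly the inputs on which the Python A raises IndexError: either line is empty
-- (A returns False), or the digit run starting at index stays in range, stops at an in-range
-- non-digit, and the one or two lookahead positions that branch then reads are in range too.
def Pre_node_one (line : String) (index : Int) (last_letter : Option String) : Prop :=
  line.toList = [] ∨
  ∃ j < 2 * line.toList.length + 1,
    (∀ k < j, (PySem.List.pyGet? line.toList (index + (k : Int))).any PySem.Chars.isdigit = true) ∧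
    pvStopOK line.toList index j last_letter = true

instance (line : String) (index : Int) (last_letter : Option String) : Decidable (Pre_node_one line index last_letter) := by unfold Pre_node_one; infer_instance

def pvWitness_node_one : String × Int × Option String := ("A. ", 0, none)

def Spec_node_one (line : String) (index : Int) (last_letter : Option String) (out : Bool) : Prop := out = node_one_alt line index last_letter
instance (line : String) (index : Int) (last_letter : Option String) (out : Bool) : Decidable (Spec_node_one line index last_letter out) := by unfold Spec_node_one; infer_instance

-- ===== CLAIM (what is proved, stated in full; the proofs are below) =====
def Claim_equal_node_one : Prop := ∀ (line : String) (index : Int) (last_letter : Option String), Dom_node_one line index last_letter → Pre_node_one line index last_letter → Spec_node_one line index last_letter (node_one line index last_letter)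

-- ===== LEMMAS AND PROOFS =====
lemma upper_not_digit (c : Char) (h : PySem.Chars.isupper c = true) :
    PySem.Chars.isdigit c = false := by
  by_contra hd
  rw [Bool.not_eq_false] at hd
  simp only [PySem.Chars.isupper, Bool.and_eq_true, decide_eq_true_eq] at h
  simp only [PySem.Chars.isdigit, Bool.and_eq_true, decide_eq_true_eq] at hd
  exact absurd (le_trans h.1 hd.2) (by decide)

-- optDigitStr of the single-digit string A threads through its recursion is just isdigit
lemma optDigitStr_single (c : Char) (h : PySem.Chars.isdigit c = true) :
    optDigitStr (some (String.ofList [c])) = true := by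
  simp [optDigitStr, PySem.Str.strIsdigit_eq, PySem.Chars.strIsdigit, h]

-- B's phase-2 classification, as a named function for the proofs
def classify (cs : List Char) (i : Int) (seen : Bool) : Bool :=
  match PySem.List.pyGet? cs i with
  | none => false
  | some c =>
    if PySem.Chars.isupper c then
      (PySem.List.pyGet? cs (i + 1) == some '.') && (PySem.List.pyGet? cs (i + 2) == some ' ')
    else if c == '.' && seen then
      PySem.List.pyGet? cs (i + 1) == some ' '
    else true

lemma alt_eq_classify (line : String) (index : Int) (last : Option String)
    (hne : line.toList ≠ []) :
    node_one_alt line index last =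
      classify line.toList (skipDigits line.toList index (optDigitStr last)).1
        (skipDigits line.toList index (optDigitStr last)).2 := by
  unfold node_one_alt classify
  simp [List.isEmpty_iff, hne]

-- A's node_two equals B's inline two-char lookahead
lemma two_eq_lookahead (cs : List Char) (hne : cs ≠ []) (i : Int) :
    nodeTwo cs i =
      ((PySem.List.pyGet? cs i == some '.') && (PySem.List.pyGet? cs (i + 1) == some ' ')) := by
  unfold nodeTwo nodeThree
  cases hc : PySem.List.pyGet? cs i with
  | none => simp [hne]
  | some d =>
    by_cases hd : d = '.'
    · cases he : PySem.List.pyGet? cs (i + 1) <;> simp [hne, hd]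
    · simp [hne, hd]

-- the core invariant: A's recursion computes classify of B's skipDigits result
lemma one_eq_skip (cs : List Char) (i : Int) (last : Option String) (hne : cs ≠ []) :
    nodeOneRec cs i last = classify cs (skipDigits cs i (optDigitStr last)).1
      (skipDigits cs i (optDigitStr last)).2 := by
  rw [nodeOneRec, skipDigits]
  cases hc : PySem.List.pyGet? cs i with
  | none => simp [hne, classify, hc]
  | some c =>
    by_cases hd : PySem.Chars.isdigit c = true
    · have hu : PySem.Chars.isupper c ≠ true := by
        intro h; rw [upper_not_digit c h] at hd; exact absurd hd (by simp)
      simp only [hne, hu, hd, if_true, if_false, Bool.false_eq_true]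
      have := one_eq_skip cs (i + 1) (some (String.ofList [c])) hne
      rwa [optDigitStr_single c hd] at this
    · by_cases hu : PySem.Chars.isupper c = true
      · simp only [hne, hu, hd, if_true, if_false, Bool.false_eq_true, classify, hc]
        rw [two_eq_lookahead cs hne (i + 1), show i + 1 + 1 = i + 2 from by ring]
        simp
      · by_cases hp : (c == '.' && optDigitStr last) = true
        · simp only [hne, hu, hd, hp, if_true, if_false, Bool.false_eq_true, classify, hc]
          rw [two_eq_lookahead cs hne i]
          have hc' : c = '.' := by
            have := hp; simp only [Bool.and_eq_true, beq_iff_eq] at this; exact this.1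
          simp [hc, hc']
        · simp [hne, hu, hd, hp, classify, hc]
termination_by ((cs.length : Int) - i).toNat
decreasing_by exact pvGetStep cs i c hc

-- ===== VERDICT (by name: the statement is the Claim_ definition above) =====
theorem node_one_spec : Claim_equal_node_one := by
  intro line index last_letter _ _
  unfold Spec_node_one node_one
  by_cases h : line.toList = []
  · rw [nodeOneRec]
    simp [h, node_one_alt]
  · rw [alt_eq_classify line index last_letter h]
    exact one_eq_skip line.toList index last_letter h
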